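-- pv_equiv track=rewrite | github.com/gareiqc/hackerRank | Algorithms/Implementation/grading_students.py | solve
-- ===== SOURCE A (Python) =====
-- def solve(grades):
-- 	final_grades = []
-- 	final_grade = 0
-- 	for i in grades:
-- 		next_mult = i
-- 		final_grade = i
-- 		if i % 5 != 0:
-- 			while(next_mult % 5 != 0):
-- 				next_mult += 1
-- 			if next_mult - i < 3 and i >= 38:
-- 				final_grade = next_mult
-- 		final_grades.append(final_grade)
--
-- 	return final_grades
-- ===== SOURCE B (Python) =====
-- def solve(grades):
--     # closed-form modular rounding instead of the incremental while-search
--     return [i + (5 - i % 5) if i >= 38 and i % 5 >= 3 else i for i in grades]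
-- ===== Notes on version B (the rewrite author's own statement) =====
-- stated objective: simpler
-- what changed: Replaces the inner while-loop search for the next multiple of 5 and the accumulator loop with a one-line list comprehension computing the rounded grade by closed-form modular arithmetic (i + (5 - i%5) when i >= 38 and i%5 >= 3).
import Mathlib
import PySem

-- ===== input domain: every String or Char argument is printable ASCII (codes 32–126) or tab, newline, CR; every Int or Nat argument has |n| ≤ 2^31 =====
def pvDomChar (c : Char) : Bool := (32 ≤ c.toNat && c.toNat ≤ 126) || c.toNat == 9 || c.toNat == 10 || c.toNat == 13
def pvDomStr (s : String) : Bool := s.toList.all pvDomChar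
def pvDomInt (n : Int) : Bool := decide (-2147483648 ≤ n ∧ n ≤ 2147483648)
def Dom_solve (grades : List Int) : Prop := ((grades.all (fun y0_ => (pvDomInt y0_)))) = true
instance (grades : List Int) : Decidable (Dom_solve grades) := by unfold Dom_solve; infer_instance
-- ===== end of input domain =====

-- B replaces A's incremental while-search for the next multiple of 5 with closed-form modular arithmetic in a single comprehension (simpler, same cost).


-- ===== PORT A =====
-- the inner 'while next_mult % 5 != 0: next_mult += 1' (fuel 5 only makes the
-- recursion structural; at most 4 increments are ever taken)
def nextMultAux : Nat → Int → Int
  | 0, n => n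
  | fuel + 1, n => if PySem.Int.mod n 5 ≠ 0 then nextMultAux fuel (n + 1) else n

def nextMultLoop (n : Int) : Int := nextMultAux 5 n

def solve (grades : List Int) : List Int :=
  grades.foldl (fun final_grades i =>
    let next_mult := nextMultLoop i
    let final_grade :=
      if PySem.Int.mod i 5 ≠ 0 then
        (if next_mult - i < 3 ∧ i ≥ 38 then next_mult else i)
      else i
    final_grades ++ [final_grade]) []

-- ===== PORT B =====
def solve_alt (grades : List Int) : List Int :=
  grades.map (fun i =>
    if i ≥ 38 ∧ PySem.Int.mod i 5 ≥ 3 then i + (5 - PySem.Int.mod i 5) else i)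

-- ===== PRECONDITION & SPEC =====
def Spec_solve (grades : List Int) (out : List Int) : Prop := out = solve_alt grades
instance (grades : List Int) (out : List Int) : Decidable (Spec_solve grades out) := by unfold Spec_solve; infer_instance

-- ===== CLAIM (what is proved, stated in full; the proofs are below) =====
def Claim_equal_solve : Prop := ∀ (grades : List Int), Dom_solve grades → Spec_solve grades (solve grades)

-- ===== LEMMAS AND PROOFS =====
lemma nextMultLoop_eq (n : Int) (h : n % 5 ≠ 0) :
    nextMultLoop n = n + (5 - n % 5) := by
  have h0 : 0 ≤ n % 5 := Int.emod_nonneg n (by norm_num)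
  have h5 : n % 5 < 5 := Int.emod_lt_of_pos n (by norm_num)
  have hm : ∀ a : Int, PySem.Int.mod a 5 = a % 5 :=
    fun a => PySem.Int.mod_eq_emod_of_pos (by norm_num)
  rcases (by omega : n % 5 = 1 ∨ n % 5 = 2 ∨ n % 5 = 3 ∨ n % 5 = 4) with h1 | h1 | h1 | h1
  · have e1 : (n + 1) % 5 = 2 := by omega
    have e2 : (n + 1 + 1) % 5 = 3 := by omega
    have e3 : (n + 1 + 1 + 1) % 5 = 4 := by omega
    have e4 : (n + 1 + 1 + 1 + 1) % 5 = 0 := by omega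
    simp [nextMultLoop, nextMultAux, hm, h1, e1, e2, e3, e4]
    omega
  · have e1 : (n + 1) % 5 = 3 := by omega
    have e2 : (n + 1 + 1) % 5 = 4 := by omega
    have e3 : (n + 1 + 1 + 1) % 5 = 0 := by omega
    simp [nextMultLoop, nextMultAux, hm, h1, e1, e2, e3]
    omega
  · have e1 : (n + 1) % 5 = 4 := by omega
    have e2 : (n + 1 + 1) % 5 = 0 := by omega
    simp [nextMultLoop, nextMultAux, hm, h1, e1, e2]
    omega
  · have e1 : (n + 1) % 5 = 0 := by omega
    simp [nextMultLoop, nextMultAux, hm, h1, e1]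

lemma elem_eq (i : Int) :
    (if PySem.Int.mod i 5 ≠ 0 then
       (if nextMultLoop i - i < 3 ∧ i ≥ 38 then nextMultLoop i else i)
     else i)
    = (if i ≥ 38 ∧ PySem.Int.mod i 5 ≥ 3 then i + (5 - PySem.Int.mod i 5) else i) := by
  have hm : PySem.Int.mod i 5 = i % 5 := PySem.Int.mod_eq_emod_of_pos (by norm_num)
  have h0 : 0 ≤ i % 5 := Int.emod_nonneg i (by norm_num)
  have h5 : i % 5 < 5 := Int.emod_lt_of_pos i (by norm_num)
  by_cases hz : i % 5 = 0
  · rw [hm, hz]; simp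
  · have hnm := nextMultLoop_eq i hz
    rw [hm]
    split_ifs <;> omega

lemma foldl_map (f : Int → Int) (l : List Int) :
    ∀ acc : List Int, l.foldl (fun a i => a ++ [f i]) acc = acc ++ l.map f := by
  induction l with
  | nil => intro acc; simp
  | cons x xs ih => intro acc; simp [List.foldl, ih, List.append_assoc]

-- ===== VERDICT (by name: the statement is the Claim_ definition above) =====
theorem solve_spec : Claim_equal_solve := by
  intro grades _
  show solve grades = solve_alt grades
  unfold solve solve_alt
  simp only [elem_eq]
  rw [foldl_map]
  simp
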